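-- pv_equiv track=rewrite | github.com/HadyTagg/policy-watch | src/policywatch/integrations/access.py | _records_to_columns
-- ===== SOURCE A (Python) =====
-- from typing import Iterable, Iterator
--
-- def _records_to_columns(records: Iterable[dict]) -> tuple[list[str], list[list]]:
--     columns: list[str] = []
--     rows: list[list] = []
--     for record in records:
--         record_keys = list(record.keys())
--         new_columns = [key for key in record_keys if key not in columns]
--         if new_columns:
--             columns.extend(new_columns)
--             for row in rows:
--                 row.extend([None] * len(new_columns))
--         rows.append([record.get(col) for col in columns])
--     return columns, rows
-- ===== SOURCE B (Python) =====
-- def _records_to_columns(records):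
--     records = list(records)
--     columns = []
--     for record in records:
--         for key in record:
--             if key not in columns:
--                 columns.append(key)
--     rows = [[record.get(col) for col in columns] for record in records]
--     return columns, rows
-- ===== Notes on version B (the rewrite author's own statement) =====
-- stated objective: simpler
-- what changed: Replaces A's single interleaved pass that grows the column list and back-patches every existing row with None padding by a clean two-phase structure: one pass computing the first-appearance key union, then building each row directly against the final column list (no padding loop).
import Mathlib
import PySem

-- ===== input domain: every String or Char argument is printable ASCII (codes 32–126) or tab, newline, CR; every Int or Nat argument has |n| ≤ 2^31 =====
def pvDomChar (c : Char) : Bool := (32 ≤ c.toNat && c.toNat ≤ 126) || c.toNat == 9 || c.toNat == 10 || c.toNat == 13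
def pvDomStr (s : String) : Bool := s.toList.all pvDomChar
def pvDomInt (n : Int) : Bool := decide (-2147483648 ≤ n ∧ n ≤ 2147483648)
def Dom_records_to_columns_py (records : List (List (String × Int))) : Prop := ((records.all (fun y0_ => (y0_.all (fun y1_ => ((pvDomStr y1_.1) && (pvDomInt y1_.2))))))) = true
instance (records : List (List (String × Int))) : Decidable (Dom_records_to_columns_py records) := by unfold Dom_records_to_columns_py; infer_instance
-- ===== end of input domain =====

-- B replaces A's interleaved grow-columns-and-back-patch-rows pass by two phases (compute the
-- first-appearance column union, then build each row against the final columns); same results.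


-- ===== PORT A =====
-- record.get(col) on the dict 'record' (assoc list in insertion order, first match)
def pvGet (record : List (String × Int)) (col : String) : Option Int :=
  PySem.Dict.get? (PySem.Dict.mk record) col

-- literal transliteration of A: one fold over records carrying (columns, rows);
-- list(record.keys()) is the record's keys in order (records hold unique keys, see Pre_)
def records_to_columns_py (records : List (List (String × Int))) : List String × List (List (Option Int)) :=
  records.foldl
    (fun st record =>
      let columns := st.1
      let rows := st.2
      let record_keys := record.map Prod.fst
      let new_columns := record_keys.filter (fun key => !(columns.contains key))
      let st' :=
        if new_columns.isEmpty then (columns, rows)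
        else (columns ++ new_columns,
              rows.map (fun row => row ++ List.replicate new_columns.length (none : Option Int)))
      (st'.1, st'.2 ++ [st'.1.map (fun col => pvGet record col)]))
    ([], [])

-- ===== PORT B =====
-- transliteration of B: first pass computes the column union, second pass builds the rows
def records_to_columns_py_alt (records : List (List (String × Int))) : List String × List (List (Option Int)) :=
  let columns := records.foldl
    (fun cols record =>
      record.foldl (fun cols kv => if cols.contains kv.1 then cols else cols ++ [kv.1]) cols)
    []
  (columns, records.map (fun record => columns.map (fun col => pvGet record col)))

-- ===== PRECONDITION & SPEC =====
-- Pre_ excludes association lists carrying a duplicated key inside one record: those do not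
-- represent any Python dict (A's input type), so A is never run on them.
def Pre_records_to_columns_py (records : List (List (String × Int))) : Prop :=
  ∀ record ∈ records, (record.map Prod.fst).Nodup
instance (records : List (List (String × Int))) : Decidable (Pre_records_to_columns_py records) := by unfold Pre_records_to_columns_py; infer_instance

def pvWitness_records_to_columns_py : (List (List (String × Int))) :=
  [[("a", 1), ("b", 2)], [("b", 3), ("c", 4)], []]

def Spec_records_to_columns_py (records : List (List (String × Int))) (out : List String × List (List (Option Int))) : Prop := out = records_to_columns_py_alt records
instance (records : List (List (String × Int))) (out : List String × List (List (Option Int))) : Decidable (Spec_records_to_columns_py records out) := by unfold Spec_records_to_columns_py; infer_instance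

-- ===== CLAIM (what is proved, stated in full; the proofs are below) =====
def Claim_equal_records_to_columns_py : Prop := ∀ (records : List (List (String × Int))), Dom_records_to_columns_py records → Pre_records_to_columns_py records → Spec_records_to_columns_py records (records_to_columns_py records)

-- ===== LEMMAS AND PROOFS =====

-- B's inner loop over one record (adding unseen keys to cols)
def pvAddKeys (cols : List String) (record : List (String × Int)) : List String :=
  record.foldl (fun cols kv => if cols.contains kv.1 then cols else cols ++ [kv.1]) cols

-- A's fold body
def pvStepA (st : List String × List (List (Option Int))) (record : List (String × Int)) :
    List String × List (List (Option Int)) :=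
  let columns := st.1
  let rows := st.2
  let record_keys := record.map Prod.fst
  let new_columns := record_keys.filter (fun key => !(columns.contains key))
  let st' :=
    if new_columns.isEmpty then (columns, rows)
    else (columns ++ new_columns,
          rows.map (fun row => row ++ List.replicate new_columns.length (none : Option Int)))
  (st'.1, st'.2 ++ [st'.1.map (fun col => pvGet record col)])

theorem pvGet_eq_none {record : List (String × Int)} {k : String}
    (h : k ∉ record.map Prod.fst) : pvGet record k = none := by
  induction record with
  | nil => rfl
  | cons kv rest ih =>
      simp only [List.map_cons, List.mem_cons, not_or] at h
      simp only [pvGet, PySem.Dict.get?, List.find?] at *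
      have : (kv.1 == k) = false := by
        simp only [beq_eq_false_iff_ne]; exact fun e => h.1 e.symm
      rw [this]
      exact ih h.2

theorem pvAddKeys_eq (record : List (String × Int)) (cols : List String)
    (hnd : (record.map Prod.fst).Nodup) :
    pvAddKeys cols record = cols ++ (record.map Prod.fst).filter (fun k => !(cols.contains k)) := by
  induction record generalizing cols with
  | nil => simp [pvAddKeys]
  | cons kv rest ih =>
      simp only [List.map_cons, List.nodup_cons] at hnd
      simp only [pvAddKeys, List.foldl_cons, List.map_cons, List.filter_cons]
      by_cases hc : kv.1 ∈ cols
      · have hcc : cols.contains kv.1 = true := List.contains_iff_mem.mpr hc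
        rw [hcc]
        simp only [Bool.not_true]
        exact ih cols hnd.2
      · have hcc : cols.contains kv.1 = false := by
          simp [hc]
        rw [hcc, if_neg (by simp)]
        rw [show List.foldl (fun cols kv => if cols.contains kv.1 = true then cols else cols ++ [kv.1])
              (cols ++ [kv.1]) rest = pvAddKeys (cols ++ [kv.1]) rest from rfl]
        rw [ih (cols ++ [kv.1]) hnd.2]
        have hfeq : (rest.map Prod.fst).filter (fun k => !((cols ++ [kv.1]).contains k))
            = (rest.map Prod.fst).filter (fun k => !(cols.contains k)) := by
          apply List.filter_congr
          intro k hk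
          have hne : k ≠ kv.1 := fun e => hnd.1 (e ▸ hk)
          simp [hne]
        rw [hfeq]
        simp

theorem pvStepA_eq (cols : List String) (rows : List (List (Option Int)))
    (record : List (String × Int)) :
    pvStepA (cols, rows) record =
      (cols ++ (record.map Prod.fst).filter (fun key => !(cols.contains key)),
       rows.map (fun row =>
           row ++ List.replicate ((record.map Prod.fst).filter (fun key => !(cols.contains key))).length
             (none : Option Int))
         ++ [(cols ++ (record.map Prod.fst).filter (fun key => !(cols.contains key))).map
              (fun col => pvGet record col)]) := by
  simp only [pvStepA]
  by_cases he : ((record.map Prod.fst).filter (fun key => !(cols.contains key))).isEmpty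
  · rw [if_pos he]
    have hnil := List.isEmpty_iff.mp he
    rw [hnil]
    simp
  · rw [if_neg he]

theorem pvMain (records : List (List (String × Int))) (cols : List String)
    (prev : List (List (String × Int)))
    (hnd : ∀ r ∈ records, (r.map Prod.fst).Nodup)
    (hprev : ∀ p ∈ prev, ∀ k ∈ p.map Prod.fst, k ∈ cols) :
    records.foldl pvStepA (cols, prev.map (fun p => cols.map (fun c => pvGet p c)))
      = (records.foldl pvAddKeys cols,
         (prev ++ records).map (fun p => (records.foldl pvAddKeys cols).map (fun c => pvGet p c))) := by
  induction records generalizing cols prev with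
  | nil => simp
  | cons record rest ih =>
      have hndr : (record.map Prod.fst).Nodup := hnd record (List.mem_cons_self ..)
      have hndrest : ∀ r ∈ rest, (r.map Prod.fst).Nodup := fun r hr => hnd r (List.mem_cons_of_mem _ hr)
      set new := (record.map Prod.fst).filter (fun key => !(cols.contains key)) with hnew
      have hnone : ∀ p ∈ prev, ∀ c ∈ new, pvGet p c = none := by
        intro p hp c hc
        rw [hnew] at hc
        have hcf := List.of_mem_filter hc
        simp only [Bool.not_eq_true'] at hcf
        apply pvGet_eq_none
        intro hkp
        have := List.contains_iff_mem.mpr (hprev p hp c hkp)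
        simp_all
      have hpad : ∀ p ∈ prev,
          cols.map (fun c => pvGet p c) ++ List.replicate new.length (none : Option Int)
            = (cols ++ new).map (fun c => pvGet p c) := by
        intro p hp
        rw [List.map_append]
        have hmap : new.map (fun c => pvGet p c) = List.replicate new.length (none : Option Int) := by
          rw [List.map_congr_left (hnone p hp)]
          simp
        rw [hmap]
      have hrows : (prev.map (fun p => cols.map (fun c => pvGet p c))).map
            (fun row => row ++ List.replicate new.length (none : Option Int))
          = prev.map (fun p => (cols ++ new).map (fun c => pvGet p c)) := by
        rw [List.map_map]
        exact List.map_congr_left (fun p hp => hpad p hp)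
      have hprev' : ∀ p ∈ prev ++ [record], ∀ k ∈ p.map Prod.fst, k ∈ cols ++ new := by
        intro p hp k hk
        rcases List.mem_append.mp hp with hp | hp
        · exact List.mem_append_left _ (hprev p hp k hk)
        · have : p = record := by simpa using hp
          subst this
          by_cases hc : k ∈ cols
          · exact List.mem_append_left _ hc
          · refine List.mem_append_right _ ?_
            rw [hnew]
            apply List.mem_filter.mpr
            refine ⟨hk, ?_⟩
            simp [hc]
      have haddk : pvAddKeys cols record = cols ++ new := pvAddKeys_eq record cols hndr
      rw [List.foldl_cons, pvStepA_eq, ← hnew, hrows]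
      have hcomb : prev.map (fun p => (cols ++ new).map (fun c => pvGet p c))
            ++ [(cols ++ new).map (fun col => pvGet record col)]
          = (prev ++ [record]).map (fun p => (cols ++ new).map (fun c => pvGet p c)) := by simp
      rw [hcomb, List.foldl_cons, haddk,
          ih (cols ++ new) (prev ++ [record]) hndrest hprev', List.append_assoc]
      simp

theorem records_to_columns_py_eq_foldl (records : List (List (String × Int))) :
    records_to_columns_py records = records.foldl pvStepA ([], []) := rfl

theorem records_to_columns_py_alt_eq (records : List (List (String × Int))) :
    records_to_columns_py_alt records
      = (records.foldl pvAddKeys [],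
         records.map (fun p => (records.foldl pvAddKeys []).map (fun c => pvGet p c))) := rfl

-- ===== VERDICT (by name: the statement is the Claim_ definition above) =====
theorem records_to_columns_py_spec : Claim_equal_records_to_columns_py := by
  intro records _ hpre
  unfold Spec_records_to_columns_py
  rw [records_to_columns_py_eq_foldl, records_to_columns_py_alt_eq]
  have := pvMain records [] [] hpre (by intro p hp; simp at hp)
  simpa using this
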